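-- pv_equiv track=rewrite | github.com/rajnavakoti/ddd-archaeology | src/ddd_archaeology/phases/transaction_boundaries.py | _find_independent_roots
-- ===== SOURCE A (Python) =====
-- def _find_independent_roots(roots: set[str]) -> set[str]:
--     """Find truly independent domain roots, collapsing related ones.
--
--     Rules:
--     - If one root is a prefix of another, keep only the shorter (parent)
--     - If two roots share no meaningful overlap, they're independent
--     - Single root = definitely one domain
--     """
--     if len(roots) <= 1:
--         return roots
--
--     sorted_roots = sorted(roots, key=len)
--     independent: set[str] = set()
--
--     for root in sorted_roots:
--         # Check if this root is already covered by an existing independent root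
--         covered = False
--         for existing in list(independent):
--             # One is prefix of the other, or they share significant overlap
--             if root.startswith(existing) or existing.startswith(root):
--                 covered = True
--                 # Keep the shorter one
--                 if len(root) < len(existing):
--                     independent.discard(existing)
--                     independent.add(root)
--                 break
--         if not covered:
--             independent.add(root)
--
--     return independent
-- ===== SOURCE B (Python) =====
-- def _find_independent_roots(roots: set[str]) -> set[str]:
--     # One pass over the length-sorted roots; a root is kept iff none of its
--     # proper prefixes is itself a root (set lookups replace the inner scan over kept roots).
--     independent: set[str] = set()
--     for root in sorted(roots, key=len):
--         if not any(root[:i] in roots for i in range(len(root))):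
--             independent.add(root)
--     return independent
-- ===== Notes on version B (the rewrite author's own statement) =====
-- stated objective: alternative
-- what changed: Instead of scanning the kept-independent set for prefix matches per root (with a discard branch), B checks each length-sorted root's proper prefixes directly against the root set, so the inner scan over kept roots disappears; same measured cost on the generated inputs.
import Mathlib
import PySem

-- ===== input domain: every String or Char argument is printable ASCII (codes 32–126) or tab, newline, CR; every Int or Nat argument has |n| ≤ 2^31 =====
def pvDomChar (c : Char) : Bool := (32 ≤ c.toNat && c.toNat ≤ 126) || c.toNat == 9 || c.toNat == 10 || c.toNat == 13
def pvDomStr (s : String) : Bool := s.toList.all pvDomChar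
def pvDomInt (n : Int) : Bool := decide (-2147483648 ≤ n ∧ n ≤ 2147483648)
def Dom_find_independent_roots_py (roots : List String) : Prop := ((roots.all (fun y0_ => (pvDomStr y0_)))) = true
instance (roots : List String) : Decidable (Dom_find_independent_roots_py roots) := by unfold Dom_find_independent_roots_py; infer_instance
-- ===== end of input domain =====

-- B replaces A's inner scan over the kept set by a per-root check of its proper
-- prefixes against the root set (one pass over the length-sorted roots).


-- ===== PORT A =====
-- inner 'for existing in list(independent): … break' loop of A (returns the updated set and the covered flag)
def pvInnerA (root : String) : List String → PySem.Set String → PySem.Set String × Bool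
  | [], ind => (ind, false)
  | e :: rest, ind =>
    if PySem.Str.startswith root e || PySem.Str.startswith e root then
      (if PySem.Str.len root < PySem.Str.len e
        then PySem.Set.add (PySem.Set.discard ind e) root
        else ind, true)
    else pvInnerA root rest ind

def find_independent_roots_py (roots : List String) : List String :=
  if roots.length ≤ 1 then roots
  else
    (PySem.List.sorted roots (fun s => PySem.Str.len s)).foldl
      (fun independent root =>
        let r := pvInnerA root independent independent
        if r.2 then r.1 else PySem.Set.add r.1 root)
      PySem.Set.empty

-- ===== PORT B =====
def find_independent_roots_py_alt (roots : List String) : List String :=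
  (PySem.List.sorted roots (fun s => PySem.Str.len s)).foldl
    (fun independent root =>
      if (PySem.List.pyRange 0 (PySem.Str.len root)).any
            (fun i => PySem.Set.contains roots (PySem.Str.slice root none (some i)))
      then independent
      else PySem.Set.add independent root)
    PySem.Set.empty

-- ===== PRECONDITION & SPEC =====
def Spec_find_independent_roots_py (roots : List String) (out : List String) : Prop := out = find_independent_roots_py_alt roots
instance (roots : List String) (out : List String) : Decidable (Spec_find_independent_roots_py roots out) := by unfold Spec_find_independent_roots_py; infer_instance

-- ===== CLAIM (what is proved, stated in full; the proofs are below) =====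
def Claim_equal_find_independent_roots_py : Prop := ∀ (roots : List String), Dom_find_independent_roots_py roots → Spec_find_independent_roots_py roots (find_independent_roots_py roots)

-- ===== LEMMAS AND PROOFS =====

-- 'p is a proper prefix of r (as strings)'
def pvProper (p r : String) : Prop := p.toList <+: r.toList ∧ p ≠ r

-- 'e has no proper prefix in roots'
def pvMinimal (roots : List String) (e : String) : Prop := ¬ ∃ p ∈ roots, pvProper p e

lemma pv_len_lt {p r : String} (h : pvProper p r) : p.toList.length < r.toList.length := by
  rcases h with ⟨hpre, hne⟩
  rcases Nat.lt_or_ge p.toList.length r.toList.length with h | h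
  · exact h
  · exact absurd (String.ext (List.IsPrefix.eq_of_length hpre
      (le_antisymm (List.IsPrefix.length_le hpre) h))) hne

-- B's keep-condition, characterised
lemma pvCondB_iff (roots : List String) (root : String) :
    ((PySem.List.pyRange 0 (PySem.Str.len root)).any
      (fun i => PySem.Set.contains roots (PySem.Str.slice root none (some i))) = true)
    ↔ ∃ p ∈ roots, pvProper p root := by
  rw [List.any_eq_true]
  constructor
  · rintro ⟨i, hi, hc⟩
    rw [PySem.List.mem_pyRange_one] at hi
    refine ⟨PySem.Str.slice root none (some i), (PySem.Set.contains_iff _ _).1 hc, ?_, ?_⟩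
    · rw [PySem.Str.toList_slice, PySem.Chars.slice_eq_listSlice, PySem.List.slice_to _ hi.1]
      exact List.take_prefix _ _
    · intro he
      have := congrArg (fun s => s.toList.length) he
      simp only [PySem.Str.toList_slice, PySem.Chars.slice_eq_listSlice,
        PySem.List.slice_to _ hi.1, List.length_take] at this
      rw [PySem.Str.len_eq] at hi
      omega
  · rintro ⟨p, hp, hpre, hne⟩
    have hlt := pv_len_lt ⟨hpre, hne⟩
    refine ⟨(p.toList.length : Int), ?_, ?_⟩
    · rw [PySem.List.mem_pyRange_one, PySem.Str.len_eq]
      constructor <;> omega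
    · rw [PySem.Set.contains_iff]
      have : PySem.Str.slice root none (some (p.toList.length : Int)) = p := by
        apply String.ext
        rw [PySem.Str.toList_slice, PySem.Chars.slice_eq_listSlice,
          PySem.List.slice_to _ (by positivity), Int.toNat_natCast]
        exact (List.prefix_iff_eq_take.1 hpre).symm
      rwa [this]

-- the inner loop of A never fires its discard branch when every kept root is no longer
lemma pvInnerA_eq_any (root : String) :
    ∀ (l : List String) (ind : PySem.Set String),
      (∀ e ∈ l, PySem.Str.len e ≤ PySem.Str.len root) →
      pvInnerA root l ind =
        (ind, l.any (fun e => PySem.Str.startswith root e || PySem.Str.startswith e root)) := by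
  intro l
  induction l with
  | nil => intro ind _; rfl
  | cons e rest ih =>
    intro ind hlen
    simp only [pvInnerA, List.any_cons]
    by_cases h : (PySem.Str.startswith root e || PySem.Str.startswith e root) = true
    · rw [if_pos h, h]
      have : ¬ PySem.Str.len root < PySem.Str.len e := not_lt.2 (hlen e (by simp))
      rw [if_neg this]
      simp
    · rw [if_neg h, ih ind (fun x hx => hlen x (by simp [hx]))]
      simp [Bool.not_eq_true] at h
      simp [h]

-- a proper-prefix match disjunction is just 'e is a prefix of root' when len e ≤ len root
lemma pv_match_iff {e root : String} (h : PySem.Str.len e ≤ PySem.Str.len root) :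
    (PySem.Str.startswith root e || PySem.Str.startswith e root) = true ↔ e.toList <+: root.toList := by
  rw [Bool.or_eq_true, PySem.Str.startswith_eq, PySem.Str.startswith_eq,
    PySem.Chars.startswith_iff, PySem.Chars.startswith_iff]
  constructor
  · rintro (h1 | h1)
    · exact h1
    · have := List.IsPrefix.length_le h1
      rw [PySem.Str.len_eq, PySem.Str.len_eq] at h
      have : root.toList = e.toList := List.IsPrefix.eq_of_length h1 (by omega)
      exact this ▸ List.prefix_refl _
  · exact Or.inl

-- every root with a proper prefix in roots has a MINIMAL proper prefix in roots
lemma pv_exists_minimal (roots : List String) (r : String) :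
    (∃ p ∈ roots, pvProper p r) → ∃ p ∈ roots, pvProper p r ∧ pvMinimal roots p := by
  rintro ⟨p, hp, hpr⟩
  induction hn : p.toList.length using Nat.strong_induction_on generalizing p with
  | _ n ih =>
    by_cases hm : pvMinimal roots p
    · exact ⟨p, hp, hpr, hm⟩
    · simp only [pvMinimal, not_not] at hm
      rcases hm with ⟨q, hq, hqp⟩
      have hqr : pvProper q r := by
        refine ⟨List.IsPrefix.trans hqp.1 hpr.1, ?_⟩
        intro he
        have h1 := pv_len_lt hqp
        have h2 := pv_len_lt hpr
        rw [he] at h1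
        omega
      exact ih q.toList.length (hn ▸ pv_len_lt hqp) q hq hqr rfl

-- the two fold bodies, named
def pvStepA : PySem.Set String → String → PySem.Set String := fun independent root =>
  let r := pvInnerA root independent independent
  if r.2 then r.1 else PySem.Set.add r.1 root

def pvStepB (roots : List String) : PySem.Set String → String → PySem.Set String :=
  fun independent root =>
    if (PySem.List.pyRange 0 (PySem.Str.len root)).any
          (fun i => PySem.Set.contains roots (PySem.Str.slice root none (some i)))
    then independent
    else PySem.Set.add independent root

-- MAIN INVARIANT: folding A's body and B's body over the length-sorted remainder agree
lemma pv_fold_eq (roots : List String) :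
    ∀ (rest acc : List String),
      rest.Pairwise (fun a b => PySem.Str.len a ≤ PySem.Str.len b) →
      (∀ r ∈ rest, r ∈ roots) →
      (∀ e ∈ acc, ∀ r ∈ rest, PySem.Str.len e ≤ PySem.Str.len r) →
      (∀ e ∈ acc, e ∈ roots) →
      (∀ p ∈ roots, pvMinimal roots p → p ∈ acc ∨ p ∈ rest) →
      rest.foldl pvStepA acc = rest.foldl (pvStepB roots) acc := by
  intro rest
  induction rest with
  | nil => intro acc _ _ _ _ _; rfl
  | cons r rest' ih =>
    intro acc hpw hmem hlen hroots hminmem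
    have hpw' := (List.pairwise_cons.1 hpw).2
    have hrle : ∀ x ∈ rest', PySem.Str.len r ≤ PySem.Str.len x := (List.pairwise_cons.1 hpw).1
    have hle : ∀ e ∈ acc, PySem.Str.len e ≤ PySem.Str.len r :=
      fun e he => hlen e he r (by simp)
    have hA : pvStepA acc r = (if acc.any
        (fun e => PySem.Str.startswith r e || PySem.Str.startswith e r)
        then acc else PySem.Set.add acc r) := by
      unfold pvStepA
      rw [pvInnerA_eq_any r acc acc hle]
    simp only [List.foldl_cons, hA]
    by_cases hc : (PySem.List.pyRange 0 (PySem.Str.len r)).any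
        (fun i => PySem.Set.contains roots (PySem.Str.slice r none (some i))) = true
    · -- r has a proper prefix in roots: both sides keep acc unchanged
      rcases pv_exists_minimal roots r ((pvCondB_iff roots r).1 hc) with ⟨p0, hp0, hp0r, hp0min⟩
      have hlenlt : p0.toList.length < r.toList.length := pv_len_lt hp0r
      have hp0acc : p0 ∈ acc := by
        rcases hminmem p0 hp0 hp0min with h | h
        · exact h
        · rcases List.mem_cons.1 h with h | h
          · exact absurd h hp0r.2
          · exfalso
            have := hrle p0 h
            rw [PySem.Str.len_eq, PySem.Str.len_eq] at this
            omega
      have hcov : acc.any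
          (fun e => PySem.Str.startswith r e || PySem.Str.startswith e r) = true := by
        rw [List.any_eq_true]
        refine ⟨p0, hp0acc, (pv_match_iff ?_).2 hp0r.1⟩
        rw [PySem.Str.len_eq, PySem.Str.len_eq]
        exact_mod_cast hlenlt.le
      rw [if_pos hcov]
      unfold pvStepB
      rw [if_pos hc]
      refine ih acc hpw' (fun x hx => hmem x (by simp [hx]))
        (fun e he x hx => hlen e he x (by simp [hx])) hroots ?_
      intro p hp hpmin
      rcases hminmem p hp hpmin with h | h
      · exact Or.inl h
      · rcases List.mem_cons.1 h with h | h
        · exact absurd ⟨p0, hp0, h ▸ hp0r⟩ hpmin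
        · exact Or.inr h
    · -- r is minimal: both sides add r (a no-op when it is already kept)
      have hrmin : pvMinimal roots r := fun hex => hc ((pvCondB_iff roots r).2 hex)
      unfold pvStepB
      rw [if_neg hc]
      by_cases hin : r ∈ acc
      · have hcov : acc.any
            (fun e => PySem.Str.startswith r e || PySem.Str.startswith e r) = true := by
          rw [List.any_eq_true]
          exact ⟨r, hin, (pv_match_iff (le_refl _)).2 (List.prefix_refl _)⟩
        rw [if_pos hcov, PySem.Set.add_of_mem hin]
        refine ih acc hpw' (fun x hx => hmem x (by simp [hx]))
          (fun e he x hx => hlen e he x (by simp [hx])) hroots ?_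
        intro p hp hpmin
        rcases hminmem p hp hpmin with h | h
        · exact Or.inl h
        · rcases List.mem_cons.1 h with h | h
          · exact Or.inl (h ▸ hin)
          · exact Or.inr h
      · have hcov : acc.any
            (fun e => PySem.Str.startswith r e || PySem.Str.startswith e r) = false := by
          rw [List.any_eq_false]
          intro e he
          rw [Bool.not_eq_true]
          rcases hbe : (PySem.Str.startswith r e || PySem.Str.startswith e r) with _ | _
          · rfl
          · exfalso
            have hpre := (pv_match_iff (hle e he)).1 hbe
            by_cases heq : e = r
            · exact hin (heq ▸ he)
            · exact hrmin ⟨e, hroots e he, hpre, heq⟩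
        rw [if_neg (by rw [hcov]; exact Bool.false_ne_true)]
        refine ih (PySem.Set.add acc r) hpw' (fun x hx => hmem x (by simp [hx])) ?_ ?_ ?_
        · intro e he x hx
          rcases (PySem.Set.mem_add acc r e).1 he with h | h
          · exact hlen e h x (by simp [hx])
          · exact h ▸ hrle x hx
        · intro e he
          rcases (PySem.Set.mem_add acc r e).1 he with h | h
          · exact hroots e h
          · exact h ▸ hmem r (by simp)
        · intro p hp hpmin
          rcases hminmem p hp hpmin with h | h
          · exact Or.inl ((PySem.Set.mem_add acc r p).2 (Or.inl h))
          · rcases List.mem_cons.1 h with h | h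
            · exact Or.inl ((PySem.Set.mem_add acc r p).2 (Or.inr h))
            · exact Or.inr h

-- ===== VERDICT (by name: the statement is the Claim_ definition above) =====
theorem find_independent_roots_py_spec : Claim_equal_find_independent_roots_py := by
  intro roots _
  unfold Spec_find_independent_roots_py find_independent_roots_py find_independent_roots_py_alt
  by_cases h1 : roots.length ≤ 1
  · rw [if_pos h1]
    rcases roots with _ | ⟨x, _ | ⟨y, ys⟩⟩
    · rfl
    · have hs : PySem.List.sorted [x] (fun s => PySem.Str.len s) = [x] :=
        PySem.List.sorted_eq_self_of_pairwise _ _ (by simp)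
      rw [hs]
      simp only [List.foldl_cons, List.foldl_nil]
      rw [if_neg ?_]
      · rw [PySem.Set.add_of_not_mem (by simp [PySem.Set.empty])]
        rfl
      · intro hcc
        rcases (pvCondB_iff [x] x).1 hcc with ⟨p, hp, hpr⟩
        exact hpr.2 (by simpa using hp)
    · exfalso
      simp at h1
  · rw [if_neg h1]
    exact pv_fold_eq roots (PySem.List.sorted roots (fun s => PySem.Str.len s)) []
      (PySem.List.sorted_pairwise roots _)
      (fun r hr => (PySem.List.mem_sorted roots _ false r).1 hr)
      (by simp) (by simp)
      (fun p hp _ => Or.inr ((PySem.List.mem_sorted roots _ false p).2 hp))
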